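-- pv_equiv track=rewrite | github.com/hlrs-121991-germany/propagation | mpi.py | split_jobs
-- ===== SOURCE A (Python) =====
-- def split_jobs(sources, runs_per_source, num_chunks):
--     num_runs = len(sources) * runs_per_source
--     batch_size, r = divmod(num_runs, num_chunks)
--     if r > 0:
--         batch_size += 1
--
--     jobs = []
--     current_source = 0
--     current_remaining = runs_per_source
--     for _ in range(num_chunks):
--         quota = batch_size
--         subjobs = []
--         while quota > 0:
--             if current_source >= len(sources):
--                 break
--             if current_remaining <= quota:
--                 subjobs.append((sources[current_source], current_remaining))
--                 quota -= current_remaining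
--                 current_source += 1
--                 current_remaining = runs_per_source
--             else:
--                 subjobs.append((sources[current_source], quota))
--                 current_remaining -= quota
--                 quota = 0
--         jobs.append(subjobs)
--     assert current_source == len(sources)
--
--     return jobs
-- ===== SOURCE B (Python) =====
-- def split_jobs(sources, runs_per_source, num_chunks):
--     num_runs = len(sources) * runs_per_source
--     batch_size, r = divmod(num_runs, num_chunks)
--     if r > 0:
--         batch_size += 1
--     R = runs_per_source
--     jobs = []
--     for c in range(num_chunks):
--         lo = c * batch_size
--         hi = min(lo + batch_size, num_runs)
--         if lo < hi:
--             s0 = lo // R                # first source overlapping [lo, hi)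
--             s1 = -((-hi) // R)          # one past the last overlapping source
--             jobs.append([(sources[s], min((s + 1) * R, hi) - max(s * R, lo))
--                          for s in range(s0, s1)])
--         else:
--             jobs.append([])
--     return jobs
-- ===== Notes on version B (the rewrite author's own statement) =====
-- stated objective: alternative
-- what changed: Replaces A's greedy stateful loop (decrementing a per-source remaining counter across chunks) with closed-form interval arithmetic: chunk c is the run interval [c*batch, min((c+1)*batch, num_runs)) and its source entries are computed directly by floor/ceil division.
import Mathlib
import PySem

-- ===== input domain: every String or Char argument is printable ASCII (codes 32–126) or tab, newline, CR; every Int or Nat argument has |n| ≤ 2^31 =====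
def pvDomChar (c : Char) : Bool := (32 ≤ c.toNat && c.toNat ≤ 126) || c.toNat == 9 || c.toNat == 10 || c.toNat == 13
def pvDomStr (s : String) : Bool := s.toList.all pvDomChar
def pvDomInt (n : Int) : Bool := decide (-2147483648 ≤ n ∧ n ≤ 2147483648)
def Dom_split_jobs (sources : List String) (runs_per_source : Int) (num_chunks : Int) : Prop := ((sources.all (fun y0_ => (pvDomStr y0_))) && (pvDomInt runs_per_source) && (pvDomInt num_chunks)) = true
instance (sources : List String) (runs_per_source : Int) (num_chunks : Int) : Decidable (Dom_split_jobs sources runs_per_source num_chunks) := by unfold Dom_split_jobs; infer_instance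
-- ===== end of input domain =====

-- B replaces A's greedy stateful decrement loop by closed-form interval arithmetic:
-- chunk c covers the global run interval [c*batch, min((c+1)*batch, num_runs)) and its
-- sources are computed by floor/ceil division; same cost, different algorithm (objective: alternative).

-- ===== PORT A =====
-- inner `while quota > 0` loop of A; returns (subjobs, current_source, current_remaining)
def pvInnerA (sources : List String) (R quota cs rem : Int) :
    List (String × Int) × Int × Int :=
  if 0 < quota then
    if cs < (sources.length : Int) then
      if rem ≤ quota then
        let r := pvInnerA sources R (quota - rem) (cs + 1) R
        ((PySem.List.pyGetD sources cs "", rem) :: r.1, r.2)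
      else
        ([(PySem.List.pyGetD sources cs "", quota)], cs, rem - quota)
    else ([], cs, rem)
  else ([], cs, rem)
termination_by ((sources.length : Int) - cs).toNat
decreasing_by omega

-- outer `for _ in range(num_chunks)` loop of A, appending one subjobs list per chunk
def pvOuterA (sources : List String) (R batch : Int) : Nat → Int → Int → List (List (String × Int))
  | 0, _, _ => []
  | k + 1, cs, rem =>
    let r := pvInnerA sources R batch cs rem
    r.1 :: pvOuterA sources R batch k r.2.1 r.2.2

def split_jobs (sources : List String) (runs_per_source : Int) (num_chunks : Int) :
    List (List (String × Int)) :=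
  let num_runs := (sources.length : Int) * runs_per_source
  match PySem.Int.divmod? num_runs num_chunks with
  | none => []  -- num_chunks = 0: Python raises ZeroDivisionError (excluded by Pre_)
  | some br =>
    let batch_size := if 0 < br.2 then br.1 + 1 else br.1
    pvOuterA sources runs_per_source batch_size num_chunks.toNat 0 runs_per_source

-- ===== PORT B =====
-- one chunk of B: the sources overlapping the run interval [c*batch, min(c*batch+batch, num_runs))
def pvChunkB (sources : List String) (R N batch c : Int) : List (String × Int) :=
  let lo := c * batch
  let hi := min (lo + batch) N
  if lo < hi then
    (PySem.List.pyRange (PySem.Int.floordiv lo R) (-(PySem.Int.floordiv (-hi) R))).map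
      (fun s => (PySem.List.pyGetD sources s "", min ((s + 1) * R) hi - max (s * R) lo))
  else []

def split_jobs_alt (sources : List String) (runs_per_source : Int) (num_chunks : Int) :
    List (List (String × Int)) :=
  let num_runs := (sources.length : Int) * runs_per_source
  match PySem.Int.divmod? num_runs num_chunks with
  | none => []  -- num_chunks = 0: Python raises ZeroDivisionError (excluded by Pre_)
  | some br =>
    let batch_size := if 0 < br.2 then br.1 + 1 else br.1
    (PySem.List.pyRange 0 num_chunks).map
      (fun c => pvChunkB sources runs_per_source num_runs batch_size c)

-- ===== PRECONDITION & SPEC =====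
-- Pre_ excludes exactly the inputs where Python A raises: num_chunks = 0 (ZeroDivisionError),
-- and nonempty sources with num_chunks < 0 or runs_per_source ≤ 0 (the final assert fails).
def Pre_split_jobs (sources : List String) (runs_per_source : Int) (num_chunks : Int) : Prop :=
  num_chunks ≠ 0 ∧ (sources = [] ∨ (0 < num_chunks ∧ 0 < runs_per_source))
instance (sources : List String) (runs_per_source : Int) (num_chunks : Int) : Decidable (Pre_split_jobs sources runs_per_source num_chunks) := by unfold Pre_split_jobs; infer_instance

def pvWitness_split_jobs : List String × Int × Int := (["a", "b", "c"], 4, 5)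

def Spec_split_jobs (sources : List String) (runs_per_source : Int) (num_chunks : Int) (out : List (List (String × Int))) : Prop := out = split_jobs_alt sources runs_per_source num_chunks
instance (sources : List String) (runs_per_source : Int) (num_chunks : Int) (out : List (List (String × Int))) : Decidable (Spec_split_jobs sources runs_per_source num_chunks out) := by unfold Spec_split_jobs; infer_instance

-- ===== CLAIM (what is proved, stated in full; the proofs are below) =====
def Claim_equal_split_jobs : Prop := ∀ (sources : List String) (runs_per_source : Int) (num_chunks : Int), Dom_split_jobs sources runs_per_source num_chunks → Pre_split_jobs sources runs_per_source num_chunks → Spec_split_jobs sources runs_per_source num_chunks (split_jobs sources runs_per_source num_chunks)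

-- ===== LEMMAS AND PROOFS =====

-- position bookkeeping: after consuming p of the N = n*R runs, A's state is
-- current_source = ⌊p/R⌋ and current_remaining = (⌊p/R⌋+1)*R - p
def pvCs (R p : Int) : Int := PySem.Int.floordiv p R
def pvRem (R p : Int) : Int := (pvCs R p + 1) * R - p

-- the chunk of runs [lo, hi), as B lists it
def pvPiece (sources : List String) (R lo hi : Int) : List (String × Int) :=
  if lo < hi then
    (PySem.List.pyRange (PySem.Int.floordiv lo R) (-(PySem.Int.floordiv (-hi) R))).map
      (fun s => (PySem.List.pyGetD sources s "", min ((s + 1) * R) hi - max (s * R) lo))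
  else []

lemma pvChunkB_eq_piece (sources : List String) (R N batch c : Int) :
    pvChunkB sources R N batch c =
      pvPiece sources R (c * batch) (min (c * batch + batch) N) := rfl

-- floor bracket for pvCs
lemma pvCs_bounds (R p : Int) (hR : 0 < R) :
    pvCs R p * R ≤ p ∧ p < (pvCs R p + 1) * R :=
  (PySem.Int.floordiv_eq_iff_of_pos hR).mp rfl

-- ceil bracket for the upper source index of a piece
lemma pvCeil_bounds (R h : Int) (hR : 0 < R) :
    (-(PySem.Int.floordiv (-h) R) - 1) * R < h ∧ h ≤ -(PySem.Int.floordiv (-h) R) * R :=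
  (PySem.Int.neg_floordiv_neg_eq_iff_of_pos hR).mp rfl

lemma pvCs_of_bounds (R p a : Int) (hR : 0 < R) (h1 : a * R ≤ p) (h2 : p < (a + 1) * R) :
    pvCs R p = a :=
  (PySem.Int.floordiv_eq_iff_of_pos hR).mpr ⟨h1, h2⟩

-- splitting off the first source of a piece when the piece reaches the next source boundary
lemma pvPiece_cons (sources : List String) (R pos hi : Int) (hR : 0 < R)
    (hlo : pos < hi) (hnext : (pvCs R pos + 1) * R ≤ hi) :
    pvPiece sources R pos hi =
      (PySem.List.pyGetD sources (pvCs R pos) "", (pvCs R pos + 1) * R - pos) ::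
        pvPiece sources R ((pvCs R pos + 1) * R) hi := by
  obtain ⟨hb1, hb2⟩ := pvCs_bounds R pos hR
  obtain ⟨hc1, hc2⟩ := pvCeil_bounds R hi hR
  have haslt : pvCs R pos < -(PySem.Int.floordiv (-hi) R) := by
    by_contra hle
    push Not at hle
    have h1 : -(PySem.Int.floordiv (-hi) R) * R ≤ pvCs R pos * R :=
      mul_le_mul_of_nonneg_right hle hR.le
    linarith
  have hnextfd : PySem.Int.floordiv ((pvCs R pos + 1) * R) R = pvCs R pos + 1 := by
    apply pvCs_of_bounds _ _ _ hR le_rfl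
    have : (pvCs R pos + 1 + 1) * R = (pvCs R pos + 1) * R + R := by ring
    linarith
  simp only [pvPiece, pvCs] at *
  rw [if_pos hlo, PySem.List.pyRange_one_cons haslt, List.map_cons,
    min_eq_left hnext, max_eq_right hb1]
  rcases lt_or_eq_of_le hnext with hnlt | hneq
  · rw [if_pos hnlt, hnextfd]
    refine congrArg _ (List.map_congr_left ?_)
    intro s hs
    obtain ⟨hs1, hs2⟩ := PySem.List.mem_pyRange_one.mp hs
    have hsr : (PySem.Int.floordiv pos R + 1) * R ≤ s * R :=
      mul_le_mul_of_nonneg_right hs1 hR.le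
    rw [max_eq_left (by linarith), max_eq_left (by linarith)]
  · rw [if_neg (by rw [hneq]; exact lt_irrefl hi)]
    have hs1le : -(PySem.Int.floordiv (-hi) R) ≤ PySem.Int.floordiv pos R + 1 := by
      have := Int.lt_of_mul_lt_mul_right (a := R)
        (b := -(PySem.Int.floordiv (-hi) R) - 1) (c := PySem.Int.floordiv pos R + 1)
        (by rw [hneq]; exact hc1) hR.le
      linarith
    rw [PySem.List.pyRange_one_eq_nil hs1le, List.map_nil]

-- a piece that ends strictly inside the current source is a singleton
lemma pvPiece_single (sources : List String) (R pos hi : Int) (hR : 0 < R)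
    (hlo : pos < hi) (hin : hi < (pvCs R pos + 1) * R) :
    pvPiece sources R pos hi = [(PySem.List.pyGetD sources (pvCs R pos) "", hi - pos)] := by
  obtain ⟨hb1, hb2⟩ := pvCs_bounds R pos hR
  have hceil : -(PySem.Int.floordiv (-hi) R) = pvCs R pos + 1 :=
    (PySem.Int.neg_floordiv_neg_eq_iff_of_pos hR).mpr
      ⟨by have : (pvCs R pos + 1 - 1) * R = pvCs R pos * R := by ring
          linarith, hin.le⟩
  simp only [pvPiece, pvCs] at *
  rw [if_pos hlo, hceil, PySem.List.pyRange_one_singleton, List.map_singleton,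
    min_eq_right hin.le, max_eq_right hb1]

-- the inner loop at the exhausted position N = n*R: no source left, nothing is emitted
lemma pvInner_top (sources : List String) (R q : Int) (hR : 0 < R) (hq : 0 ≤ q) :
    pvInnerA sources R q (pvCs R ((sources.length : Int) * R)) (pvRem R ((sources.length : Int) * R)) =
      (pvPiece sources R ((sources.length : Int) * R) (min ((sources.length : Int) * R + q) ((sources.length : Int) * R)),
       pvCs R (min ((sources.length : Int) * R + q) ((sources.length : Int) * R)),
       pvRem R (min ((sources.length : Int) * R + q) ((sources.length : Int) * R))) := by
  have hmin : min ((sources.length : Int) * R + q) ((sources.length : Int) * R)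
      = (sources.length : Int) * R := min_eq_right (by linarith)
  have hcs : pvCs R ((sources.length : Int) * R) = (sources.length : Int) := by
    apply pvCs_of_bounds _ _ _ hR le_rfl
    have : ((sources.length : Int) + 1) * R = (sources.length : Int) * R + R := by ring
    linarith
  rw [hmin, pvInnerA, hcs, pvPiece, if_neg (lt_irrefl _)]
  simp

-- the inner while loop, started at position pos with quota q, produces exactly the piece
-- [pos, min(pos+q, N)) and ends in the state of position min(pos+q, N)
lemma pvInner_eq (sources : List String) (R : Int) (hR : 0 < R) (f : Nat) :
    ∀ (pos q : Int), 0 ≤ pos → pos ≤ (sources.length : Int) * R → 0 ≤ q →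
    (((sources.length : Int) * R - pos).toNat ≤ f) →
    pvInnerA sources R q (pvCs R pos) (pvRem R pos) =
      (pvPiece sources R pos (min (pos + q) ((sources.length : Int) * R)),
       pvCs R (min (pos + q) ((sources.length : Int) * R)),
       pvRem R (min (pos + q) ((sources.length : Int) * R))) := by
  induction f with
  | zero =>
    intro pos q h0 hN hq hf
    have h1 : (sources.length : Int) * R - pos ≤ 0 := Int.toNat_eq_zero.mp (Nat.le_zero.mp hf)
    have hpos : pos = (sources.length : Int) * R := le_antisymm hN (by linarith)
    rw [hpos]
    exact pvInner_top sources R q hR hq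
  | succ f ih =>
    intro pos q h0 hN hq hf
    rcases eq_or_lt_of_le hN with htop | hlt
    · rw [htop]
      exact pvInner_top sources R q hR hq
    · obtain ⟨hb1, hb2⟩ := pvCs_bounds R pos hR
      have hcslt : pvCs R pos < (sources.length : Int) :=
        Int.lt_of_mul_lt_mul_right (by linarith) hR.le
      have hrem : pvRem R pos = (pvCs R pos + 1) * R - pos := rfl
      have hrempos : 0 < pvRem R pos := by rw [hrem]; linarith
      have hcs1le : pvCs R pos + 1 ≤ (sources.length : Int) := hcslt
      have hN' : (pvCs R pos + 1) * R ≤ (sources.length : Int) * R :=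
        mul_le_mul_of_nonneg_right hcs1le hR.le
      rcases hq.lt_or_eq with hqpos | hq0
      · -- 0 < q
        rw [pvInnerA, if_pos hqpos, if_pos hcslt]
        by_cases hrq : pvRem R pos ≤ q
        · -- first branch: consume the rest of the current source and recurse
          have hcs' : pvCs R ((pvCs R pos + 1) * R) = pvCs R pos + 1 := by
            apply pvCs_of_bounds _ _ _ hR le_rfl
            have : (pvCs R pos + 1 + 1) * R = (pvCs R pos + 1) * R + R := by ring
            linarith
          have hrem' : pvRem R ((pvCs R pos + 1) * R) = R := by
            simp only [pvRem, hcs']; ring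
          have hmeas : (((sources.length : Int) * R - (pvCs R pos + 1) * R).toNat ≤ f) := by
            have hlt2 : (sources.length : Int) * R - (pvCs R pos + 1) * R
                < (sources.length : Int) * R - pos := by linarith
            have := (Int.toNat_lt_toNat (by linarith : (0:Int) < (sources.length : Int) * R - pos)).mpr hlt2
            omega
          have hrec := ih ((pvCs R pos + 1) * R) (q - pvRem R pos) (by linarith) hN' (by linarith) hmeas
          rw [hcs', hrem'] at hrec
          rw [if_pos hrq]
          simp only [hrec]
          have harg : (pvCs R pos + 1) * R + (q - pvRem R pos) = pos + q := by
            rw [hrem]; ring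
          rw [harg]
          have hlo' : pos < min (pos + q) ((sources.length : Int) * R) := lt_min (by linarith) hlt
          have hnext' : (pvCs R pos + 1) * R ≤ min (pos + q) ((sources.length : Int) * R) :=
            le_min (by rw [hrem] at hrq; linarith) hN'
          rw [pvPiece_cons sources R pos _ hR hlo' hnext', hrem]
        · -- second branch: the chunk ends inside the current source
          rw [if_neg hrq]
          push Not at hrq
          have hq_lt : pos + q < (pvCs R pos + 1) * R := by rw [hrem] at hrq; linarith
          have hmin : min (pos + q) ((sources.length : Int) * R) = pos + q :=
            min_eq_left (by linarith)
          rw [hmin]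
          have hcs2 : pvCs R (pos + q) = pvCs R pos := pvCs_of_bounds _ _ _ hR (by linarith) hq_lt
          have hrem2 : pvRem R (pos + q) = pvRem R pos - q := by
            simp only [pvRem, hcs2]
            ring
          rw [pvPiece_single sources R pos (pos + q) hR (by linarith) hq_lt, hcs2, hrem2]
          norm_num
      · -- q = 0
        rw [← hq0, pvInnerA]
        have hmin : min (pos + 0) ((sources.length : Int) * R) = pos := by
          rw [add_zero]; exact min_eq_left hlt.le
        rw [hmin, pvPiece, if_neg (lt_irrefl pos)]
        simp

-- the outer loop, started at chunk c in the state of position min(c*batch, N),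
-- produces exactly B's chunks c, c+1, …, c+k-1
lemma pvOuter_eq (sources : List String) (R batch : Int) (hR : 0 < R) (hb : 0 ≤ batch) :
    ∀ (k c : Nat),
      pvOuterA sources R batch k
          (pvCs R (min ((c : Int) * batch) ((sources.length : Int) * R)))
          (pvRem R (min ((c : Int) * batch) ((sources.length : Int) * R))) =
        (List.range' c k).map
          (fun i => pvChunkB sources R ((sources.length : Int) * R) batch (i : Int)) := by
  intro k
  induction k with
  | zero => intro c; rfl
  | succ k ih =>
    intro c
    have hN0 : (0:Int) ≤ (sources.length : Int) * R := mul_nonneg (Int.natCast_nonneg _) hR.le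
    have hc0 : (0:Int) ≤ (c : Int) * batch := mul_nonneg (Int.natCast_nonneg _) hb
    have h0 : (0:Int) ≤ min ((c : Int) * batch) ((sources.length : Int) * R) := le_min hc0 hN0
    have hNle : min ((c : Int) * batch) ((sources.length : Int) * R) ≤ (sources.length : Int) * R :=
      min_le_right _ _
    have hcast : ((c + 1 : Nat) : Int) * batch = (c : Int) * batch + batch := by push_cast; ring
    have hinner := pvInner_eq sources R hR
      (((sources.length : Int) * R - min ((c : Int) * batch) ((sources.length : Int) * R)).toNat)
      (min ((c : Int) * batch) ((sources.length : Int) * R)) batch h0 hNle hb le_rfl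
    have hstep : min (min ((c : Int) * batch) ((sources.length : Int) * R) + batch) ((sources.length : Int) * R)
        = min (((c + 1 : Nat) : Int) * batch) ((sources.length : Int) * R) := by
      by_cases hle : (c : Int) * batch ≤ (sources.length : Int) * R
      · rw [min_eq_left hle, hcast]
      · push Not at hle
        rw [min_eq_right hle.le, min_eq_right (by linarith), min_eq_right (by rw [hcast]; linarith)]
    have hpiece : pvPiece sources R (min ((c : Int) * batch) ((sources.length : Int) * R))
          (min (min ((c : Int) * batch) ((sources.length : Int) * R) + batch) ((sources.length : Int) * R))
        = pvChunkB sources R ((sources.length : Int) * R) batch (c : Int) := by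
      rw [pvChunkB_eq_piece]
      by_cases hle : (c : Int) * batch ≤ (sources.length : Int) * R
      · rw [min_eq_left hle]
      · push Not at hle
        rw [min_eq_right hle.le, min_eq_right (by linarith)]
        have hhi : min ((c : Int) * batch + batch) ((sources.length : Int) * R)
            ≤ (sources.length : Int) * R := min_le_right _ _
        rw [pvPiece, if_neg (lt_irrefl _), pvPiece, if_neg (by linarith [hhi])]
    rw [hstep] at hinner hpiece
    simp only [pvOuterA, hinner, hpiece, ih (c + 1)]
    simp [List.range'_succ]

lemma pvInnerA_nil (R q rem : Int) : pvInnerA [] R q 0 rem = ([], 0, rem) := by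
  rw [pvInnerA]
  simp

lemma pvOuterA_nil (R batch rem : Int) :
    ∀ k : Nat, pvOuterA [] R batch k 0 rem = List.replicate k [] := by
  intro k
  induction k with
  | zero => rfl
  | succ k ih =>
    rw [List.replicate_succ, ← ih]
    simp only [pvOuterA, pvInnerA_nil]

-- ===== VERDICT (by name: the statement is the Claim_ definition above) =====
theorem split_jobs_spec : Claim_equal_split_jobs := by
  intro sources rps K hDom hPre
  obtain ⟨hK, hcase⟩ := hPre
  unfold Spec_split_jobs split_jobs split_jobs_alt
  have hdm : PySem.Int.divmod? ((sources.length : Int) * rps) K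
      = some (PySem.Int.floordiv ((sources.length : Int) * rps) K,
              PySem.Int.mod ((sources.length : Int) * rps) K) := by
    simp [PySem.Int.divmod?, PySem.Int.floordiv, PySem.Int.mod, hK]
  simp only [hdm]
  rcases hcase with hnil | ⟨hKpos, hRpos⟩
  · -- sources = []: every chunk is empty on both sides
    subst hnil
    simp only [List.length_nil, Nat.cast_zero, zero_mul]
    have hmod : PySem.Int.mod 0 K = 0 := (PySem.Int.mod_eq_zero_iff_dvd 0 K).mpr (dvd_zero K)
    have hfd : PySem.Int.floordiv 0 K = 0 := by
      have h := PySem.Int.floordiv_mul_add_mod 0 K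
      rw [hmod, add_zero] at h
      exact (mul_eq_zero.mp h).resolve_right hK
    rw [hmod, hfd]
    simp only [lt_irrefl, if_false]
    rw [pvOuterA_nil]
    have hchunk : ∀ c : Int, pvChunkB [] rps 0 0 c = [] := by
      intro c; simp [pvChunkB]
    simp [hchunk, List.map_const', PySem.List.length_pyRange_one]
  · -- num_chunks > 0 and runs_per_source > 0
    have hN0 : (0:Int) ≤ (sources.length : Int) * rps :=
      mul_nonneg (Int.natCast_nonneg _) hRpos.le
    have hfd0 : 0 ≤ PySem.Int.floordiv ((sources.length : Int) * rps) K :=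
      (PySem.Int.le_floordiv_iff_mul_le hKpos).mpr (by linarith)
    set batch := (if 0 < PySem.Int.mod ((sources.length : Int) * rps) K
        then PySem.Int.floordiv ((sources.length : Int) * rps) K + 1
        else PySem.Int.floordiv ((sources.length : Int) * rps) K) with hbatch
    have hb : 0 ≤ batch := by
      rw [hbatch]; split_ifs <;> linarith
    have hcs0 : pvCs rps 0 = 0 := by
      apply pvCs_of_bounds _ _ _ hRpos <;> simp [hRpos]
    have hrem0 : pvRem rps 0 = rps := by
      simp only [pvRem, hcs0]; ring
    have houter := pvOuter_eq sources rps batch hRpos hb K.toNat 0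
    rw [Nat.cast_zero, zero_mul, min_eq_left hN0, hcs0, hrem0] at houter
    rw [PySem.List.pyRange_one]
    simp only [houter, List.range_eq_range', List.map_map, sub_zero]
    simp only [List.pure_def, List.bind_eq_flatMap, List.map_flatMap, List.map_cons, List.map_nil, zero_add, Function.comp_def]
    exact (List.map_eq_flatMap).symm
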